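-- pv_equiv track=rewrite | github.com/AbdelrhmanSror/probelm_solving_python | smallestWindow.py | smallest_window_to_sort
-- ===== SOURCE A (Python) =====
-- def smallest_window_to_sort(array):
--     sorted_array = sorted(array)
--     start_index = 0
--     end_index = 0
--     for i in range(len(array)):
--         if not sorted_array[i] == array[i]:
--             start_index = i
--             break
--     for i in reversed(range(len(array))):
--         if not sorted_array[i] == array[i]:
--             end_index = i
--             break
--     return start_index, end_index
-- ===== SOURCE B (Python) =====
-- def smallest_window_to_sort(array):
--     n = len(array)
--     if n == 0:
--         return 0, 0
--     end_index = 0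
--     running_max = array[0]
--     for i in range(1, n):
--         if array[i] < running_max:
--             end_index = i
--         else:
--             running_max = array[i]
--     start_index = 0
--     running_min = array[n - 1]
--     for i in range(n - 2, -1, -1):
--         if array[i] > running_min:
--             start_index = i
--         else:
--             running_min = array[i]
--     return start_index, end_index
-- ===== Notes on version B (the rewrite author's own statement) =====
-- stated objective: alternative
-- what changed: A sorts a copy of the array and scans for the first/last index where it disagrees with the original; B never sorts: one left-to-right pass tracks the running maximum (the last index falling below it is the window end) and one right-to-left pass tracks the running minimum (the last index rising above it is the window start); O(n) passes instead of an O(n log n) sort, though CPython's C-level sort keeps measured times comparable.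
import Mathlib
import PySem

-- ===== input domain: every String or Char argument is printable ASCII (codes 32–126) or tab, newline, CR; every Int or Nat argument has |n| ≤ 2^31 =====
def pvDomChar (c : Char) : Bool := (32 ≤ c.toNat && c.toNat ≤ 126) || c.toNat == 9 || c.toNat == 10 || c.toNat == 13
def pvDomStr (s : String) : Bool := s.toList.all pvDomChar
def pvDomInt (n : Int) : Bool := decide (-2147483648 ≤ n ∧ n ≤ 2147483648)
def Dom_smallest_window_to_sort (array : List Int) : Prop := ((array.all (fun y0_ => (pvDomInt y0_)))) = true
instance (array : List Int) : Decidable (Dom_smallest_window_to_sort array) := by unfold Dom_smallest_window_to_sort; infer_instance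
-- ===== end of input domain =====

-- B replaces A's sort-and-compare by two sort-free linear passes: a running maximum
-- left→right (last index falling below it = window end) and a running minimum
-- right→left (last index rising above it = window start); objective: alternative.

-- ===== PORT A =====
-- A's two for-loops with break: first index i (in the given traversal order) with
-- sorted_array[i] != array[i]; the loop variable keeps that i, default accumulator is 0.
def pvAScan (s a : List Int) : List Int → Int
  | [] => 0
  | i :: rest =>
    if ¬ (PySem.List.pyGet? s i = PySem.List.pyGet? a i) then i else pvAScan s a rest

def smallest_window_to_sort (array : List Int) : Int × Int :=
  let sorted_array := PySem.List.sorted array (fun x => x) false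
  let start_index := pvAScan sorted_array array (PySem.List.pyRange 0 (array.length : Int) 1)
  let end_index := pvAScan sorted_array array ((PySem.List.pyRange 0 (array.length : Int) 1).reverse)
  (start_index, end_index)

-- ===== PORT B =====
-- left→right pass: e := last i with array[i] < running max
def pvBEnd (a : List Int) : List Int → Int → Int → Int
  | [], e, _ => e
  | i :: rest, e, m =>
    let x := PySem.List.pyGetD a i 0
    if x < m then pvBEnd a rest i m else pvBEnd a rest e x

-- right→left pass: st := last-assigned (= smallest) i with array[i] > running min
def pvBStart (a : List Int) : List Int → Int → Int → Int
  | [], st, _ => st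
  | i :: rest, st, m =>
    let x := PySem.List.pyGetD a i 0
    if m < x then pvBStart a rest i m else pvBStart a rest st x

def smallest_window_to_sort_alt (array : List Int) : Int × Int :=
  if array.length = 0 then (0, 0)
  else
    let n : Int := (array.length : Int)
    let e := pvBEnd array (PySem.List.pyRange 1 n 1) 0 (PySem.List.pyGetD array 0 0)
    let st := pvBStart array (PySem.List.pyRange (n - 2) (-1) (-1)) 0 (PySem.List.pyGetD array (n - 1) 0)
    (st, e)

-- ===== PRECONDITION & SPEC =====
def Spec_smallest_window_to_sort (array : List Int) (out : Int × Int) : Prop := out = smallest_window_to_sort_alt array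
instance (array : List Int) (out : Int × Int) : Decidable (Spec_smallest_window_to_sort array out) := by unfold Spec_smallest_window_to_sort; infer_instance

-- ===== CLAIM (what is proved, stated in full; the proofs are below) =====
def Claim_equal_smallest_window_to_sort : Prop := ∀ (array : List Int), Dom_smallest_window_to_sort array → Spec_smallest_window_to_sort array (smallest_window_to_sort array)

-- ===== LEMMAS AND PROOFS =====

def pvS (a : List Int) : List Int := PySem.List.sorted a (fun x => x) false
def pvPM (a : List Int) (i : Nat) : Bool :=
  decide (¬ (PySem.List.pyGet? (pvS a) (i : Int) = PySem.List.pyGet? a (i : Int)))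


def pvM0 (a : List Int) (k : Nat) : Int := (a.take k).foldl max (a.getD 0 0)
def pvMF (a : List Int) (k : Nat) : Int := (a.drop k).foldl min (a.getD (a.length - 1) 0)


lemma pvAScan_eq (a : List Int) (L : List Nat) :
    pvAScan (pvS a) a (L.map (fun (k : Nat) => (k : Int)))
      = ((L.find? (pvPM a)).map (fun (k : Nat) => (k : Int))).getD 0 := by
  induction L with
  | nil => rfl
  | cons i rest ih =>
    by_cases h : PySem.List.pyGet? (pvS a) (i : Int) = PySem.List.pyGet? a (i : Int)
    · rw [List.map_cons, pvAScan, if_neg (not_not_intro h),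
        List.find?_cons_of_neg (by simp [pvPM, h]), ih]
    · rw [List.map_cons, pvAScan, if_pos h,
        List.find?_cons_of_pos (by simp only [pvPM, decide_eq_true_eq]; simpa using h)]
      rfl

lemma foldl_min_swap (l : List Int) (s x : Int) :
    l.foldl min (min s x) = min x (l.foldl min s) := by
  induction l generalizing s with
  | nil => simp [min_comm]
  | cons y t ih =>
    simp only [List.foldl_cons]
    rw [show min (min s x) y = min (min s y) x by rw [min_right_comm], ih]


lemma pvM0_succ (a : List Int) (k : Nat) (hk : k < a.length) :
    pvM0 a (k + 1) = max (pvM0 a k) (a.getD k 0) := by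
  unfold pvM0
  rw [List.take_add_one, List.getElem?_eq_getElem hk]
  simp only [Option.toList_some, List.foldl_append, List.foldl_cons, List.foldl_nil]
  rw [List.getD_eq_getElem a 0 hk]

lemma pvMF_step (a : List Int) (k : Nat) (hk : k < a.length) :
    pvMF a k = min (a.getD k 0) (pvMF a (k + 1)) := by
  unfold pvMF
  rw [List.drop_eq_getElem_cons hk]
  simp only [List.foldl_cons]
  rw [foldl_min_swap, List.getD_eq_getElem a 0 hk]

lemma find?_eq_some_of_pairwise {α : Type} (r : α → α → Prop) (p : α → Bool)
    (hirr : ∀ x, ¬ r x x) (hasym : ∀ x y, r x y → ¬ r y x) :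
    ∀ (L : List α), L.Pairwise r → ∀ m,
      (L.find? p = some m ↔ m ∈ L ∧ p m = true ∧ ∀ j ∈ L, r j m → p j = false) := by
  intro L
  induction L with
  | nil => intro _ m; simp
  | cons x t ih =>
    intro hp m
    rw [List.pairwise_cons] at hp
    by_cases hx : p x = true
    · rw [List.find?_cons_of_pos hx]
      constructor
      · rintro ⟨rfl⟩
        refine ⟨List.mem_cons_self, hx, ?_⟩
        intro j hj hr
        rcases List.mem_cons.mp hj with rfl | hj
        · exact absurd hr (hirr j)
        · exact absurd hr (hasym _ _ (hp.1 j hj))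
      · rintro ⟨hm, hpm, hmin⟩
        rcases List.mem_cons.mp hm with rfl | hm
        · rfl
        · exact absurd hx (by simpa using hmin x List.mem_cons_self (hp.1 m hm))
    · rw [List.find?_cons_of_neg hx, ih hp.2 m]
      constructor
      · rintro ⟨hm, hpm, hmin⟩
        refine ⟨List.mem_cons_of_mem _ hm, hpm, ?_⟩
        intro j hj hr
        rcases List.mem_cons.mp hj with rfl | hj
        · simpa using hx
        · exact hmin j hj hr
      · rintro ⟨hm, hpm, hmin⟩
        rcases List.mem_cons.mp hm with rfl | hm
        · exact absurd hpm hx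
        · exact ⟨hm, hpm, fun j hj hr => hmin j (List.mem_cons_of_mem _ hj) hr⟩

def pvPE (a : List Int) (i : Nat) : Bool := decide (a.getD i 0 < pvM0 a i)
def pvPS (a : List Int) (i : Nat) : Bool := decide (pvMF a (i + 1) < a.getD i 0)

lemma pvBEnd_eq (a : List Int) : ∀ (cnt k : Nat) (e : Int), k + cnt = a.length →
    pvBEnd a ((List.range' k cnt).map (fun (j : Nat) => (j : Int))) e (pvM0 a k)
      = ((((List.range' k cnt).reverse).find? (pvPE a)).map (fun (j : Nat) => (j : Int))).getD e := by
  intro cnt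
  induction cnt with
  | zero => intro k e _; rfl
  | succ cnt ih =>
    intro k e hlen
    have hk : k < a.length := by omega
    rw [List.range'_succ, List.map_cons, pvBEnd]
    simp only [PySem.List.pyGetD_natCast]
    have hrev : (k :: List.range' (k+1) cnt).reverse = (List.range' (k+1) cnt).reverse ++ [k] := by
      simp
    rw [hrev, List.find?_append]
    by_cases hx : a.getD k 0 < pvM0 a k
    · have hpe : pvPE a k = true := by simp only [pvPE, decide_eq_true_eq]; exact hx
      have hM : pvM0 a (k + 1) = pvM0 a k := by
        rw [pvM0_succ a k hk]; exact max_eq_left (le_of_lt hx)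
      rw [if_pos hx, ← hM, ih (k+1) (↑k) (by omega)]
      cases hfind : ((List.range' (k+1) cnt).reverse).find? (pvPE a) with
      | none => simp [hfind, hpe]
      | some v => simp [hfind]
    · have hpe : pvPE a k = false := by simp only [pvPE, decide_eq_false_iff_not]; exact hx
      have hM : pvM0 a (k + 1) = a.getD k 0 := by
        rw [pvM0_succ a k hk]; exact max_eq_right (not_lt.mp hx)
      rw [if_neg hx, ← hM, ih (k+1) e (by omega)]
      cases hfind : ((List.range' (k+1) cnt).reverse).find? (pvPE a) with
      | none => simp [hfind, hpe]
      | some v => simp [hfind]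

lemma pvBStart_eq (a : List Int) : ∀ (k : Nat) (s0 : Int), k < a.length →
    pvBStart a (((List.range k).reverse).map (fun (j : Nat) => (j : Int))) s0 (pvMF a k)
      = (((List.range k).find? (pvPS a)).map (fun (j : Nat) => (j : Int))).getD s0 := by
  intro k
  induction k with
  | zero => intro s0 _; rfl
  | succ k ih =>
    intro s0 hlen
    have hk : k < a.length := by omega
    have hrev : (List.range (k+1)).reverse = k :: (List.range k).reverse := by
      rw [List.range_succ]; simp
    rw [hrev, List.map_cons, pvBStart]
    simp only [PySem.List.pyGetD_natCast]
    rw [List.range_succ, List.find?_append]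
    by_cases hx : pvMF a (k + 1) < a.getD k 0
    · have hps : pvPS a k = true := by simp only [pvPS, decide_eq_true_eq]; exact hx
      have hM : pvMF a k = pvMF a (k + 1) := by
        rw [pvMF_step a k hk]; exact min_eq_right (le_of_lt hx)
      rw [if_pos hx, ← hM, ih (↑k) (by omega)]
      cases hfind : (List.range k).find? (pvPS a) with
      | none => simp [hfind, hps]
      | some v => simp [hfind]
    · have hps : pvPS a k = false := by simp only [pvPS, decide_eq_false_iff_not]; exact hx
      have hM : pvMF a k = a.getD k 0 := by
        rw [pvMF_step a k hk]; exact min_eq_left (not_lt.mp hx)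
      rw [if_neg hx, ← hM, ih s0 (by omega)]
      cases hfind : (List.range k).find? (pvPS a) with
      | none => simp [hfind, hps]
      | some v => simp [hfind]

lemma lt_foldl_max_iff (l : List Int) (s x : Int) :
    x < l.foldl max s ↔ x < s ∨ ∃ y ∈ l, x < y := by
  induction l generalizing s with
  | nil => simp
  | cons y t ih =>
    simp only [List.foldl_cons, ih, lt_max_iff, List.mem_cons]
    constructor
    · rintro (⟨h | h⟩ | ⟨z, hz, h⟩)
      · exact Or.inl h
      · exact Or.inr ⟨y, Or.inl rfl, h⟩
      · exact Or.inr ⟨z, Or.inr hz, h⟩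
    · rintro (h | ⟨z, (rfl | hz), h⟩)
      · exact Or.inl (Or.inl h)
      · exact Or.inl (Or.inr h)
      · exact Or.inr ⟨z, hz, h⟩

lemma foldl_min_lt_iff (l : List Int) (s x : Int) :
    l.foldl min s < x ↔ s < x ∨ ∃ y ∈ l, y < x := by
  induction l generalizing s with
  | nil => simp
  | cons y t ih =>
    simp only [List.foldl_cons, ih, min_lt_iff, List.mem_cons]
    constructor
    · rintro (⟨h | h⟩ | ⟨z, hz, h⟩)
      · exact Or.inl h
      · exact Or.inr ⟨y, Or.inl rfl, h⟩
      · exact Or.inr ⟨z, Or.inr hz, h⟩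
    · rintro (h | ⟨z, (rfl | hz), h⟩)
      · exact Or.inl (Or.inl h)
      · exact Or.inl (Or.inr h)
      · exact Or.inr ⟨z, hz, h⟩

lemma mem_drop_iff (l : List Int) (n : Nat) (x : Int) :
    x ∈ l.drop n ↔ ∃ i, n ≤ i ∧ ∃ h : i < l.length, l[i] = x := by
  rw [List.mem_iff_getElem]
  constructor
  · rintro ⟨i, h, rfl⟩
    rw [List.getElem_drop]
    exact ⟨n + i, by omega, by simp at h; omega, rfl⟩
  · rintro ⟨i, hn, h, rfl⟩
    refine ⟨i - n, by simp; omega, ?_⟩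
    rw [List.getElem_drop]
    congr 1
    omega

lemma pvPM_iff (a : List Int) (i : Nat) (hi : i < a.length) :
    pvPM a i = true ↔ ¬ (pvS a).getD i 0 = a.getD i 0 := by
  have hs : i < (pvS a).length := by
    rw [pvS, PySem.List.length_sorted]; exact hi
  simp only [pvPM, decide_eq_true_eq, PySem.List.pyGet?_natCast,
    List.getElem?_eq_getElem hi, List.getElem?_eq_getElem hs,
    List.getD_eq_getElem a 0 hi, List.getD_eq_getElem (pvS a) 0 hs, Option.some_inj]

lemma pvPE_iff (a : List Int) (i : Nat) (hi : i < a.length) :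
    pvPE a i = true ↔ ∃ j, j < i ∧ a.getD i 0 < a.getD j 0 := by
  simp only [pvPE, decide_eq_true_eq, pvM0, lt_foldl_max_iff, List.mem_take_iff_getElem]
  constructor
  · rintro (h | ⟨y, ⟨j, hj, rfl⟩, h⟩)
    · -- a.getD i 0 < a.getD 0 0 forces i ≠ 0
      rcases Nat.eq_zero_or_pos i with rfl | hpos
      · exact absurd h (lt_irrefl _)
      · exact ⟨0, hpos, h⟩
    · refine ⟨j, by omega, ?_⟩
      rwa [List.getD_eq_getElem a 0 (by omega : j < a.length)]
  · rintro ⟨j, hj, h⟩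
    rcases Nat.eq_zero_or_pos j with rfl | hpos
    · exact Or.inl h
    · refine Or.inr ⟨a.getD j 0, ⟨j, by omega, ?_⟩, h⟩
      rw [List.getD_eq_getElem a 0 (by omega : j < a.length)]

lemma pvPS_iff (a : List Int) (i : Nat) (hi : i + 1 < a.length) :
    pvPS a i = true ↔ ∃ j, i < j ∧ j < a.length ∧ a.getD j 0 < a.getD i 0 := by
  simp only [pvPS, decide_eq_true_eq, pvMF, foldl_min_lt_iff, mem_drop_iff]
  constructor
  · rintro (h | ⟨y, ⟨j, hj, hjl, rfl⟩, h⟩)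
    · exact ⟨a.length - 1, by omega, by omega, h⟩
    · refine ⟨j, by omega, by omega, ?_⟩
      rwa [List.getD_eq_getElem a 0 hjl]
  · rintro ⟨j, hj, hjl, h⟩
    rcases Nat.eq_or_lt_of_le (by omega : j + 1 ≤ a.length) with heq | hlt
    · left
      rwa [show a.length - 1 = j by omega]
    · refine Or.inr ⟨a.getD j 0, ⟨j, by omega, hjl, ?_⟩, h⟩
      rw [List.getD_eq_getElem a 0 hjl]

lemma pvK1 (a : List Int) (k : Nat) :
    (∀ i, k ≤ i → i < a.length → a.getD i 0 = (pvS a).getD i 0)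
      ↔ (∀ i, k ≤ i → i < a.length → ∀ j, j < i → a.getD j 0 ≤ a.getD i 0) := by
  have hlenS : (PySem.List.sorted a (fun x => x) false).length = a.length :=
    PySem.List.length_sorted a _ false
  have hlen : (pvS a).length = a.length := hlenS
  constructor
  · intro h i hki hi j hj
    have hdrop : a.drop k = (pvS a).drop k := by
      apply List.ext_getElem (by simp [hlen])
      intro u h1 h2
      rw [List.getElem_drop, List.getElem_drop]
      have hu : k + u < a.length := by simp at h1; omega
      have := h (k + u) (by omega) hu
      rwa [List.getD_eq_getElem a 0 hu, List.getD_eq_getElem (pvS a) 0 (by omega)] at this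
    have hperm : (a.take k).Perm ((pvS a).take k) := by
      have hp : (a.take k ++ a.drop k).Perm ((pvS a).take k ++ (pvS a).drop k) := by
        rw [List.take_append_drop, List.take_append_drop]
        exact (PySem.List.sorted_perm a _ false).symm
      rw [hdrop] at hp
      exact (List.perm_append_right_iff _).mp hp
    have hieq : a.getD i 0 = (pvS a)[i]'(by omega) := by
      rw [h i hki hi, List.getD_eq_getElem (pvS a) 0 (by omega)]
    by_cases hjk : k ≤ j
    · have hjeq : a.getD j 0 = (pvS a)[j]'(by omega) := by
        rw [h j hjk (by omega), List.getD_eq_getElem (pvS a) 0 (by omega)]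
      rw [hieq, hjeq]
      exact PySem.List.sorted_id_getElem_mono a (le_of_lt hj) (by omega)
    · push_neg at hjk
      have hjl : j < a.length := by omega
      have hmemA : a.getD j 0 ∈ a.take k := by
        rw [List.getD_eq_getElem a 0 hjl]
        exact List.mem_take_iff_getElem.mpr ⟨j, by omega, rfl⟩
      obtain ⟨j', hj', hjeq⟩ := List.mem_take_iff_getElem.mp (hperm.mem_iff.mp hmemA)
      rw [hieq, ← hjeq]
      have hj'k : j' < k := by omega
      exact PySem.List.sorted_id_getElem_mono a (by omega) (by omega)
  · intro h i hki hi
    have hperm : ((PySem.List.sorted (a.take k) (fun x => x) false) ++ a.drop k).Perm a := by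
      have h1 : (PySem.List.sorted (a.take k) (fun x => x) false).Perm (a.take k) :=
        PySem.List.sorted_perm _ _ _
      have h2 := h1.append (List.Perm.refl (a.drop k))
      rwa [List.take_append_drop] at h2
    have hpair : ((PySem.List.sorted (a.take k) (fun x => x) false) ++ a.drop k).Pairwise
        (fun x y => x ≤ y) := by
      rw [List.pairwise_append]
      refine ⟨PySem.List.sorted_pairwise _ _, ?_, ?_⟩
      · rw [List.pairwise_iff_getElem]
        intro u v hu hv huv
        rw [List.getElem_drop, List.getElem_drop]
        have hv' : k + v < a.length := by simp at hv; omega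
        have := h (k + v) (by omega) hv' (k + u) (by omega)
        rwa [List.getD_eq_getElem a 0 (by omega), List.getD_eq_getElem a 0 hv'] at this
      · intro x hx y hy
        have hx' : x ∈ a.take k := ((PySem.List.sorted_perm _ _ _).mem_iff).mp hx
        obtain ⟨jx, hjx, rfl⟩ := List.mem_take_iff_getElem.mp hx'
        obtain ⟨u, hu, rfl⟩ := List.mem_iff_getElem.mp hy
        rw [List.getElem_drop]
        have hu' : k + u < a.length := by simp at hu; omega
        have := h (k + u) (by omega) hu' jx (by omega)
        rwa [List.getD_eq_getElem a 0 (by omega), List.getD_eq_getElem a 0 hu'] at this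
    have hs : pvS a = (PySem.List.sorted (a.take k) (fun x => x) false) ++ a.drop k :=
      PySem.List.sorted_id_eq_of_perm_of_pairwise a _ hperm hpair
    have hlen2 : (PySem.List.sorted (a.take k) (fun x => x) false).length = min k a.length := by
      rw [PySem.List.length_sorted, List.length_take]
    rw [pvS] at hs
    rw [pvS, hs, List.getD_append_right _ _ _ _ (by omega), hlen2]
    have hik : i - min k a.length < (a.drop k).length := by simp; omega
    rw [List.getD_eq_getElem _ 0 hik, List.getD_eq_getElem a 0 hi, List.getElem_drop]
    congr 1
    omega

lemma pvK2 (a : List Int) (k : Nat) :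
    (∀ i, i < k → i < a.length → a.getD i 0 = (pvS a).getD i 0)
      ↔ (∀ i, i < k → i < a.length → ∀ j, i < j → j < a.length → a.getD i 0 ≤ a.getD j 0) := by
  have hlenS : (PySem.List.sorted a (fun x => x) false).length = a.length :=
    PySem.List.length_sorted a _ false
  have hlen : (pvS a).length = a.length := hlenS
  constructor
  · intro h i hik hi j hij hj
    have htake : a.take k = (pvS a).take k := by
      apply List.ext_getElem (by simp [hlen])
      intro u h1 h2
      rw [List.getElem_take, List.getElem_take]
      have hu : u < a.length := by simp at h1; omega
      have hu2 : u < k := by simp at h1; omega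
      have := h u hu2 hu
      rwa [List.getD_eq_getElem a 0 hu, List.getD_eq_getElem (pvS a) 0 (by omega)] at this
    have hperm : (a.drop k).Perm ((pvS a).drop k) := by
      have hp : (a.take k ++ a.drop k).Perm ((pvS a).take k ++ (pvS a).drop k) := by
        rw [List.take_append_drop, List.take_append_drop]
        exact (PySem.List.sorted_perm a _ false).symm
      rw [htake] at hp
      exact (List.perm_append_left_iff _).mp hp
    have hieq : a.getD i 0 = (pvS a)[i]'(by omega) := by
      rw [h i hik hi, List.getD_eq_getElem (pvS a) 0 (by omega)]
    by_cases hjk : j < k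
    · have hjeq : a.getD j 0 = (pvS a)[j]'(by omega) := by
        rw [h j hjk hj, List.getD_eq_getElem (pvS a) 0 (by omega)]
      rw [hieq, hjeq]
      exact PySem.List.sorted_id_getElem_mono a (le_of_lt hij) (by omega)
    · push_neg at hjk
      have hmemA : a.getD j 0 ∈ a.drop k := by
        rw [List.getD_eq_getElem a 0 hj]
        exact (mem_drop_iff a k _).mpr ⟨j, hjk, hj, rfl⟩
      obtain ⟨j', hj'k, hj'l, hjeq⟩ := (mem_drop_iff (pvS a) k _).mp (hperm.mem_iff.mp hmemA)
      rw [hieq, ← hjeq]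
      exact PySem.List.sorted_id_getElem_mono a (by omega) (by omega)
  · intro h i hik hi
    have hperm : (a.take k ++ PySem.List.sorted (a.drop k) (fun x => x) false).Perm a := by
      have h1 : (PySem.List.sorted (a.drop k) (fun x => x) false).Perm (a.drop k) :=
        PySem.List.sorted_perm _ _ _
      have h2 := (List.Perm.refl (a.take k)).append h1
      rwa [List.take_append_drop] at h2
    have hpair : (a.take k ++ PySem.List.sorted (a.drop k) (fun x => x) false).Pairwise
        (fun x y => x ≤ y) := by
      rw [List.pairwise_append]
      refine ⟨?_, PySem.List.sorted_pairwise _ _, ?_⟩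
      · rw [List.pairwise_iff_getElem]
        intro u v hu hv huv
        rw [List.getElem_take, List.getElem_take]
        have hv' : v < a.length := by simp at hv; omega
        have hvk : v < k := by simp at hv; omega
        have := h u (by omega) (by omega) v (by omega) hv'
        rwa [List.getD_eq_getElem a 0 (by omega), List.getD_eq_getElem a 0 hv'] at this
      · intro x hx y hy
        obtain ⟨jx, hjx, rfl⟩ := List.mem_take_iff_getElem.mp hx
        have hy' : y ∈ a.drop k := ((PySem.List.sorted_perm _ _ _).mem_iff).mp hy
        obtain ⟨u, hku, hu, rfl⟩ := (mem_drop_iff a k _).mp hy'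
        have := h jx (by omega) (by omega) u (by omega) hu
        rwa [List.getD_eq_getElem a 0 (by omega), List.getD_eq_getElem a 0 hu] at this
    have hs : pvS a = a.take k ++ PySem.List.sorted (a.drop k) (fun x => x) false :=
      PySem.List.sorted_id_eq_of_perm_of_pairwise a _ hperm hpair
    rw [pvS] at hs
    rw [pvS, hs, List.getD_append _ _ _ _ (by simp; omega),
      List.getD_eq_getElem a 0 hi, List.getD_eq_getElem (a.take k) 0 (by simp; omega),
      List.getElem_take]

lemma pvPM_false (a : List Int) (i : Nat) (hi : i < a.length) (h : pvPM a i = false) :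
    a.getD i 0 = (pvS a).getD i 0 := by
  by_contra hne
  have : pvPM a i = true := (pvPM_iff a i hi).mpr (fun he => hne he.symm)
  simp [this] at h

lemma pvOE (a : List Int) :
    ((List.range a.length).reverse).find? (pvPM a)
      = ((List.range' 1 (a.length - 1)).reverse).find? (pvPE a) := by
  have hgt_irr : ∀ x : Nat, ¬ x > x := fun x => lt_irrefl x
  have hgt_asym : ∀ x y : Nat, x > y → ¬ y > x := fun x y h => not_lt.mpr (le_of_lt h)
  cases hfind : ((List.range a.length).reverse).find? (pvPM a) with
  | none =>
    have hpm : ∀ j, j < a.length → pvPM a j = false := by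
      have hnone := List.find?_eq_none.mp hfind
      intro j hj
      simpa using hnone j (by simp [List.mem_range, hj])
    have hnoinv := (pvK1 a 0).mp (fun i _ hi => pvPM_false a i hi (hpm i hi))
    symm
    rw [List.find?_eq_none]
    intro j hmem hpe
    have hj : 1 ≤ j ∧ j < a.length := by
      simp only [List.mem_reverse, List.mem_range'_1] at hmem
      omega
    obtain ⟨j', hj', hlt⟩ := (pvPE_iff a j hj.2).mp hpe
    exact absurd (hnoinv j (by omega) hj.2 j' hj') (not_le.mpr hlt)
  | some m =>
    have hpair1 : ((List.range a.length).reverse).Pairwise (fun x y => x > y) := by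
      rw [List.pairwise_reverse]; exact List.pairwise_lt_range
    obtain ⟨hmem, hpm, hmax⟩ := (find?_eq_some_of_pairwise (fun x y : Nat => x > y) (pvPM a)
      hgt_irr hgt_asym _ hpair1 m).mp hfind
    have hm : m < a.length := by simpa using hmem
    have hmatch : ∀ i, m + 1 ≤ i → i < a.length → a.getD i 0 = (pvS a).getD i 0 := by
      intro i h1 h2
      exact pvPM_false a i h2 (hmax i (by simp [h2]) (by omega))
    have hnoinv := (pvK1 a (m + 1)).mp hmatch
    have hnotall : ¬ (∀ j, j < m → a.getD j 0 ≤ a.getD m 0) := by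
      intro hall
      have hmatch' : ∀ i, m ≤ i → i < a.length → a.getD i 0 = (pvS a).getD i 0 :=
        (pvK1 a m).mpr (by
          intro i hmi hi j hj
          rcases Nat.eq_or_lt_of_le hmi with rfl | hlt
          · exact hall j hj
          · exact hnoinv i (by omega) hi j hj)
      exact (pvPM_iff a m hm).mp hpm ((hmatch' m le_rfl hm).symm)
    push_neg at hnotall
    obtain ⟨j0, hj0, hj0lt⟩ := hnotall
    have hpem : pvPE a m = true := (pvPE_iff a m hm).mpr ⟨j0, hj0, hj0lt⟩
    have hm1 : 1 ≤ m := by omega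
    have hpair2 : ((List.range' 1 (a.length - 1)).reverse).Pairwise (fun x y => x > y) := by
      rw [List.pairwise_reverse]; exact List.pairwise_lt_range'
    symm
    rw [find?_eq_some_of_pairwise (fun x y : Nat => x > y) (pvPE a) hgt_irr hgt_asym _ hpair2 m]
    refine ⟨by simp only [List.mem_reverse, List.mem_range'_1]; omega, hpem, ?_⟩
    intro j hmem2 hjm
    have hj : 1 ≤ j ∧ j < a.length := by
      simp only [List.mem_reverse, List.mem_range'_1] at hmem2
      omega
    rw [← Bool.not_eq_true]
    intro hpe
    obtain ⟨j', hj', hlt⟩ := (pvPE_iff a j hj.2).mp hpe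
    exact absurd (hnoinv j (by omega) hj.2 j' hj') (not_le.mpr hlt)

lemma pvOS (a : List Int) :
    (List.range a.length).find? (pvPM a)
      = (List.range (a.length - 1)).find? (pvPS a) := by
  have hlt_irr : ∀ x : Nat, ¬ x < x := fun x => lt_irrefl x
  have hlt_asym : ∀ x y : Nat, x < y → ¬ y < x := fun x y h => not_lt.mpr (le_of_lt h)
  cases hfind : (List.range a.length).find? (pvPM a) with
  | none =>
    have hpm : ∀ j, j < a.length → pvPM a j = false := by
      have hnone := List.find?_eq_none.mp hfind
      intro j hj
      simpa using hnone j (by simp [List.mem_range, hj])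
    have hnoinv := (pvK2 a a.length).mp
      (fun i hik hi => pvPM_false a i hi (hpm i hi))
    symm
    rw [List.find?_eq_none]
    intro j hmem hps
    have hj : j + 1 < a.length := by simp [List.mem_range] at hmem; omega
    obtain ⟨j', hj', hj'l, hlt⟩ := (pvPS_iff a j hj).mp hps
    exact absurd (hnoinv j (by omega) (by omega) j' hj' hj'l) (not_le.mpr hlt)
  | some m =>
    obtain ⟨hmem, hpm, hmin⟩ := (find?_eq_some_of_pairwise (fun x y : Nat => x < y) (pvPM a)
      hlt_irr hlt_asym _ List.pairwise_lt_range m).mp hfind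
    have hm : m < a.length := by simpa using hmem
    have hmatch : ∀ i, i < m → i < a.length → a.getD i 0 = (pvS a).getD i 0 := by
      intro i h1 h2
      exact pvPM_false a i h2 (hmin i (by simp [h2]) h1)
    have hnoinv := (pvK2 a m).mp hmatch
    have hnotall : ¬ (∀ j, m < j → j < a.length → a.getD m 0 ≤ a.getD j 0) := by
      intro hall
      have hmatch' : ∀ i, i < m + 1 → i < a.length → a.getD i 0 = (pvS a).getD i 0 :=
        (pvK2 a (m + 1)).mpr (by
          intro i hi1 hi j hij hjl
          rcases Nat.eq_or_lt_of_le (by omega : i ≤ m) with rfl | hlt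
          · exact hall j hij hjl
          · exact hnoinv i hlt hi j hij hjl)
      exact (pvPM_iff a m hm).mp hpm ((hmatch' m (by omega) hm).symm)
    push_neg at hnotall
    obtain ⟨j0, hj0, hj0l, hj0lt⟩ := hnotall
    have hm1 : m + 1 < a.length := by omega
    have hpsm : pvPS a m = true := (pvPS_iff a m hm1).mpr ⟨j0, hj0, hj0l, hj0lt⟩
    symm
    rw [find?_eq_some_of_pairwise (fun x y : Nat => x < y) (pvPS a)
      hlt_irr hlt_asym _ List.pairwise_lt_range m]
    refine ⟨by simp [List.mem_range]; omega, hpsm, ?_⟩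
    intro j hmem2 hjm
    have hj : j + 1 < a.length := by simp [List.mem_range] at hmem2; omega
    rw [← Bool.not_eq_true]
    intro hps
    obtain ⟨j', hj', hj'l, hlt⟩ := (pvPS_iff a j hj).mp hps
    exact absurd (hnoinv j hjm (by omega) j' hj' hj'l) (not_le.mpr hlt)


lemma pvMain (a : List Int) : smallest_window_to_sort a = smallest_window_to_sort_alt a := by
  rcases eq_or_ne a.length 0 with h0 | h0
  · have : a = [] := List.eq_nil_of_length_eq_zero h0
    subst this; rfl
  · have hn : 1 ≤ a.length := by omega
    have hcast1 : ((a.length : Int) - 1) = ((a.length - 1 : Nat) : Int) := by omega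
    have ha : smallest_window_to_sort a
        = (pvAScan (pvS a) a (PySem.List.pyRange 0 (a.length : Int) 1),
           pvAScan (pvS a) a ((PySem.List.pyRange 0 (a.length : Int) 1).reverse)) := rfl
    have halt : smallest_window_to_sort_alt a
        = (pvBStart a (PySem.List.pyRange ((a.length : Int) - 2) (-1) (-1)) 0
             (PySem.List.pyGetD a ((a.length : Int) - 1) 0),
           pvBEnd a (PySem.List.pyRange 1 (a.length : Int) 1) 0 (PySem.List.pyGetD a 0 0)) := by
      unfold smallest_window_to_sort_alt
      rw [if_neg h0]
    rw [ha, halt]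
    have hA0 : PySem.List.pyRange 0 (a.length : Int) 1
        = (List.range a.length).map (fun (k : Nat) => (k : Int)) :=
      PySem.List.pyRange_zero_nat a.length
    have hB1 : PySem.List.pyRange 1 (a.length : Int) 1
        = (List.range' 1 (a.length - 1)).map (fun (j : Nat) => (j : Int)) := by
      rw [PySem.List.pyRange_one 1 (a.length : Int), List.range'_eq_map_range, List.map_map]
      have hh : ((a.length : Int) - 1).toNat = a.length - 1 := by omega
      rw [hh]
      apply List.map_congr_left
      intro x _
      simp
    have hB2 : PySem.List.pyRange ((a.length : Int) - 2) (-1) (-1)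
        = ((List.range (a.length - 1)).reverse).map (fun (j : Nat) => (j : Int)) := by
      rw [PySem.List.pyRange_neg_one_eq_reverse]
      have h1 : (-1 : Int) + 1 = 0 := by omega
      have h2 : ((a.length : Int) - 2) + 1 = ((a.length - 1 : Nat) : Int) := by omega
      rw [h1, h2, PySem.List.pyRange_zero_nat, List.map_reverse]
    have hM1 : PySem.List.pyGetD a 0 0 = pvM0 a 1 := by
      rw [PySem.List.pyGetD_zero, pvM0_succ a 0 (by omega)]
      simp [pvM0]
    have hMF : PySem.List.pyGetD a ((a.length : Int) - 1) 0 = pvMF a (a.length - 1) := by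
      rw [hcast1, PySem.List.pyGetD_natCast]
      have hend : pvMF a (a.length - 1 + 1) = a.getD (a.length - 1) 0 := by
        have hh : a.length - 1 + 1 = a.length := by omega
        rw [hh, pvMF, List.drop_length, List.foldl_nil]
      rw [pvMF_step a (a.length - 1) (by omega), hend, min_self]
    rw [hA0, hB1, hB2, hM1, hMF, ← List.map_reverse]
    rw [pvAScan_eq a (List.range a.length), pvAScan_eq a ((List.range a.length).reverse),
      pvBEnd_eq a (a.length - 1) 1 0 (by omega), pvBStart_eq a (a.length - 1) 0 (by omega),
      pvOS, pvOE]

-- ===== VERDICT (by name: the statement is the Claim_ definition above) =====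
theorem smallest_window_to_sort_spec : Claim_equal_smallest_window_to_sort := by
  intro array _
  exact pvMain array
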